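-- pv_equiv track=rewrite | github.com/Saydur8853/child_message | home/newsindex_view.py | insert_advertisements
-- ===== SOURCE A (Python) =====
-- def insert_advertisements(details_text, box_adv_url):
--     """Inserts advertisements within the details text based on word count."""
--     if not details_text or not box_adv_url:
--         return details_text
--
--     words = details_text.split()
--     word_limit = 200
--     ad_markup = f'<img src="{box_adv_url}" class="mx-auto" alt="add" />'
--
--     if len(words) <= word_limit:
--         # If text is less than or equal to 200 words, add the ad at the end
--         return details_text + ad_markup
--
--     # Insert ads every 200 words
--     parts = []
--     for i in range(0, len(words), word_limit):
--         part = " ".join(words[i:i + word_limit])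
--         parts.append(part)
--         if i + word_limit < len(words):  # Don't add ad after the last chunk
--             parts.append(ad_markup)
--
--     return " ".join(parts)
-- ===== SOURCE B (Python) =====
-- def insert_advertisements(details_text, box_adv_url):
--     """Inserts advertisements within the details text based on word count."""
--     if not details_text or not box_adv_url:
--         return details_text
--
--     words = details_text.split()
--     ad_markup = f'<img src="{box_adv_url}" class="mx-auto" alt="add" />'
--
--     if len(words) <= 200:
--         # Short text keeps its original whitespace, ad appended at the end
--         return details_text + ad_markup
--
--     # Single linear pass: emit each word, and after every 200th word
--     # (except the very last word) emit the ad markup.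
--     out = []
--     for idx, word in enumerate(words):
--         if (idx + 1) % 200 == 0 and idx != len(words) - 1:
--             out.append(word)
--             out.append(ad_markup)
--         else:
--             out.append(word)
--     return " ".join(out)
-- ===== Notes on version B (the rewrite author's own statement) =====
-- stated objective: simpler
-- what changed: Replaced the index-range chunking (slices of 200 words joined per chunk, chunk list interleaved with ads, then re-joined) by a single flat enumerate pass that appends each word and splices the ad after every 200th non-final word, followed by one join.
import Mathlib
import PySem

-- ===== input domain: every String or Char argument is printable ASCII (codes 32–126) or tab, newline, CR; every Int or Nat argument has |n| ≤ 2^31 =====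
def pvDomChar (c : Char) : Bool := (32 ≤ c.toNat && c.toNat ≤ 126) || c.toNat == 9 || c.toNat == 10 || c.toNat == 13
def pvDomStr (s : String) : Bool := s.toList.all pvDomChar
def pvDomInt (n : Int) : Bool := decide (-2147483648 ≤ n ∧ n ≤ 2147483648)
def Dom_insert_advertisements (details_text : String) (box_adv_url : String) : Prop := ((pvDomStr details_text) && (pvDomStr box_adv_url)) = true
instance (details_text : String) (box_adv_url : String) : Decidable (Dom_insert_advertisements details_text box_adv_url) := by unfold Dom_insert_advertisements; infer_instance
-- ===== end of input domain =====

-- B replaces A's index-range chunking (200-word slices joined per chunk, chunks interleaved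
-- with the ad, re-joined) by one flat pass over the words that splices the ad after every
-- 200th non-final word, then a single join — a simpler decomposition, same result.

-- ===== PORT A =====
def insert_advertisements (details_text : String) (box_adv_url : String) : String :=
  if details_text = "" ∨ box_adv_url = "" then details_text
  else
    let words := PySem.Str.split₀ details_text
    let ad_markup := "<img src=\"" ++ box_adv_url ++ "\" class=\"mx-auto\" alt=\"add\" />"
    if words.length ≤ 200 then details_text ++ ad_markup
    else
      let parts := (PySem.List.pyRange 0 (words.length : Int) 200).foldl
        (fun parts i =>
          let part := PySem.Str.join " " (PySem.List.slice words (some i) (some (i + 200)))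
          let parts := parts ++ [part]
          if i + 200 < (words.length : Int) then parts ++ [ad_markup] else parts)
        []
      PySem.Str.join " " parts

-- ===== PORT B =====
def insert_advertisements_alt (details_text : String) (box_adv_url : String) : String :=
  if details_text = "" ∨ box_adv_url = "" then details_text
  else
    let words := PySem.Str.split₀ details_text
    let ad_markup := "<img src=\"" ++ box_adv_url ++ "\" class=\"mx-auto\" alt=\"add\" />"
    if words.length ≤ 200 then details_text ++ ad_markup
    else
      let out := (PySem.List.enumerate words 0).foldl
        (fun acc p =>
          if PySem.Int.mod (p.1 + 1) 200 == 0 && p.1 != (words.length : Int) - 1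
          then acc ++ [p.2, ad_markup] else acc ++ [p.2])
        []
      PySem.Str.join " " out

-- ===== PRECONDITION & SPEC =====
def Spec_insert_advertisements (details_text : String) (box_adv_url : String) (out : String) : Prop := out = insert_advertisements_alt details_text box_adv_url
instance (details_text : String) (box_adv_url : String) (out : String) : Decidable (Spec_insert_advertisements details_text box_adv_url out) := by unfold Spec_insert_advertisements; infer_instance

-- ===== CLAIM (what is proved, stated in full; the proofs are below) =====
def Claim_equal_insert_advertisements : Prop := ∀ (details_text : String) (box_adv_url : String), Dom_insert_advertisements details_text box_adv_url → Spec_insert_advertisements details_text box_adv_url (insert_advertisements details_text box_adv_url)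

-- ===== LEMMAS AND PROOFS =====

-- A's chunk list: 200-word chunks joined, the ad between consecutive chunks.
def chunksA (ad : String) (ws : List String) : List String :=
  if _h : ws.length ≤ 200 then [PySem.Str.join " " ws]
  else PySem.Str.join " " (ws.take 200) :: ad :: chunksA ad (ws.drop 200)
  termination_by ws.length
  decreasing_by simp; omega

-- B's flat list, chunk-shaped: the words with the ad after each full non-final chunk.
def flatC (ad : String) (ws : List String) : List String :=
  if _h : ws.length ≤ 200 then ws
  else ws.take 200 ++ ad :: flatC ad (ws.drop 200)
  termination_by ws.length
  decreasing_by simp; omega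

-- B's flat list, word-by-word: s is the global index of the head, n the total word count.
def flatB (ad : String) (n : Int) : List String → Int → List String
  | [], _ => []
  | w :: t, s =>
      (if PySem.Int.mod (s + 1) 200 == 0 && s != n - 1 then [w, ad] else [w]) ++ flatB ad n t (s + 1)

lemma pyRange200_nil (a b : Int) (h : b ≤ a) : PySem.List.pyRange a b 200 = [] := by
  rw [PySem.List.pyRange_of_pos a b (by norm_num)]
  simp [show ¬ a < b by omega]

lemma pyRange200_cons (a b : Int) (h : a < b) :
    PySem.List.pyRange a b 200 = a :: PySem.List.pyRange (a + 200) b 200 := by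
  rw [PySem.List.pyRange_of_pos a b (by norm_num),
      PySem.List.pyRange_of_pos (a + 200) b (by norm_num)]
  by_cases h2 : a + 200 < b
  · have hc : ((b - a + 200 - 1) / 200).toNat = ((b - (a + 200) + 200 - 1) / 200).toNat + 1 := by
      omega
    rw [if_pos h, if_pos h2, hc, List.range_succ_eq_map]
    simp only [List.map_cons, List.map_map, Nat.cast_zero, mul_zero, add_zero]
    refine List.cons_eq_cons.mpr ⟨rfl, ?_⟩
    apply List.map_congr_left
    intro k _
    simp [Function.comp, Nat.succ_eq_add_one]
    ring
  · rw [if_pos h, if_neg h2]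
    have hc : ((b - a + 200 - 1) / 200).toNat = 1 := by omega
    rw [hc]
    simp

lemma foldA_gen (ad : String) (words : List String) :
    ∀ (fuel k : Nat) (acc : List String), words.length - k ≤ fuel → k < words.length →
    (PySem.List.pyRange (k : Int) (words.length : Int) 200).foldl
      (fun parts i =>
        let part := PySem.Str.join " " (PySem.List.slice words (some i) (some (i + 200)))
        let parts := parts ++ [part]
        if i + 200 < (words.length : Int) then parts ++ [ad] else parts)
      acc
    = acc ++ chunksA ad (words.drop k) := by
  intro fuel
  induction fuel with
  | zero => intro k acc h1 h2; omega
  | succ f ih =>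
    intro k acc h1 h2
    rw [pyRange200_cons _ _ (by exact_mod_cast h2), List.foldl_cons]
    have hs : PySem.List.slice words (some (k : Int)) (some ((k : Int) + 200))
        = (words.drop k).take 200 := by
      have := PySem.List.slice_natCast_add words k 200
      simpa using this
    by_cases h3 : k + 200 < words.length
    · have h3' : (k : Int) + 200 < (words.length : Int) := by exact_mod_cast h3
      simp only [hs, if_pos h3']
      have hcast : (k : Int) + 200 = ((k + 200 : Nat) : Int) := by push_cast; ring_nf
      rw [hcast, ih (k + 200) _ (by omega) h3]
      have hch : chunksA ad (List.drop k words)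
          = PySem.Str.join " " ((List.drop k words).take 200) :: ad
              :: chunksA ad (List.drop (k + 200) words) := by
        rw [chunksA, dif_neg (by simp; omega), List.drop_drop]
      rw [hch]
      simp
    · have h3' : ¬ ((k : Int) + 200 < (words.length : Int)) := by
        intro hcon; exact h3 (by exact_mod_cast hcon)
      simp only [hs, if_neg h3']
      rw [pyRange200_nil _ _ (by omega), List.foldl_nil]
      rw [chunksA, dif_pos (by simp; omega)]
      rw [List.take_of_length_le (by simp; omega)]

lemma foldB_gen (ad : String) (n : Int) :
    ∀ (ws : List String) (s : Int) (acc : List String),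
    (PySem.List.enumerate ws s).foldl
      (fun acc p =>
        if PySem.Int.mod (p.1 + 1) 200 == 0 && p.1 != n - 1
        then acc ++ [p.2, ad] else acc ++ [p.2])
      acc
    = acc ++ flatB ad n ws s := by
  intro ws
  induction ws with
  | nil => intro s acc; simp [flatB, PySem.List.enumerate_nil]
  | cons w t ih =>
    intro s acc
    rw [PySem.List.enumerate_cons, List.foldl_cons, ih]
    by_cases hc : (PySem.Int.mod (s + 1) 200 == 0 && s != n - 1) = true
    · simp only [flatB, hc, if_pos]; simp
    · simp only [flatB, eq_false_of_ne_true hc]; simp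

-- the port's Bool condition as a plain proposition
lemma condB (n s : Int) :
    (PySem.Int.mod (s + 1) 200 == 0 && s != n - 1)
      = decide ((s + 1) % 200 = 0 ∧ s ≠ n - 1) := by
  by_cases h1 : (s + 1) % 200 = 0 <;> by_cases h2 : s = n - 1 <;> simp [h1, h2]

lemma flatB_append (ad : String) (n : Int) (xs ys : List String) :
    ∀ (s : Int), flatB ad n (xs ++ ys) s = flatB ad n xs s ++ flatB ad n ys (s + xs.length) := by
  induction xs with
  | nil => intro s; simp [flatB]
  | cons x xs' ih =>
    intro s
    simp only [List.cons_append, flatB, ih (s + 1), List.append_assoc, List.length_cons]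
    have h : s + 1 + (xs'.length : Int) = s + ((xs'.length : Int) + 1) := by ring
    push_cast
    rw [h]

lemma flatB_no_ad (ad : String) (n : Int) :
    ∀ (ws : List String) (s : Int),
    (∀ j : Int, s ≤ j → j < s + ws.length → ¬((j + 1) % 200 = 0 ∧ j ≠ n - 1)) →
    flatB ad n ws s = ws := by
  intro ws
  induction ws with
  | nil => intro s _; simp [flatB]
  | cons w t ih =>
    intro s h
    have h0 : ¬((s + 1) % 200 = 0 ∧ s ≠ n - 1) :=
      h s le_rfl (by simp only [List.length_cons]; push_cast; omega)
    simp only [flatB, condB, decide_eq_false h0, Bool.false_eq_true, if_false]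
    rw [ih (s + 1) (fun j hj1 hj2 => h j (by omega)
      (by simp only [List.length_cons] at *; push_cast at hj2 ⊢; omega))]
    simp

lemma flatB_chunk (ad : String) (n : Int) :
    ∀ (c : List String) (s : Int), c ≠ [] →
    (∀ j : Int, s ≤ j → j < s + c.length - 1 → ¬((j + 1) % 200 = 0 ∧ j ≠ n - 1)) →
    ((s + c.length) % 200 = 0 ∧ s + c.length - 1 ≠ n - 1) →
    flatB ad n c s = c ++ [ad] := by
  intro c
  induction c with
  | nil => intro s h; exact absurd rfl h
  | cons w t ih =>
    intro s _ hmid hlast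
    cases t with
    | nil =>
      simp only [List.length_cons, List.length_nil, Nat.cast_one, zero_add] at hlast
      have hx : (s + 1) % 200 = 0 ∧ s ≠ n - 1 := ⟨by omega, by omega⟩
      simp only [flatB, condB, decide_eq_true hx, if_true]
      simp
    | cons v t' =>
      have h0 : ¬((s + 1) % 200 = 0 ∧ s ≠ n - 1) :=
        hmid s le_rfl (by simp only [List.length_cons]; push_cast; omega)
      conv_lhs => rw [flatB]
      simp only [condB, decide_eq_false h0, Bool.false_eq_true, if_false]
      rw [ih (s + 1) (by simp)
          (fun j hj1 hj2 => hmid j (by omega)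
            (by simp only [List.length_cons] at *; push_cast at hj2 ⊢; omega))
          (by simp only [List.length_cons] at hlast ⊢
              push_cast at hlast ⊢
              exact ⟨by omega, by omega⟩)]
      simp

lemma flatB_eq_flatC (ad : String) (n : Int) :
    ∀ (fuel : Nat) (ws : List String) (s : Int), ws.length ≤ fuel → 0 ≤ s →
    s % 200 = 0 → n = s + ws.length →
    flatB ad n ws s = flatC ad ws := by
  intro fuel
  induction fuel with
  | zero =>
    intro ws s h1 _ _ _
    have h : ws = [] := List.eq_nil_of_length_eq_zero (by omega)
    subst h; simp [flatB, flatC]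
  | succ f ih =>
    intro ws s h1 hs hmod hn
    by_cases h : ws.length ≤ 200
    · rw [flatC, dif_pos h]
      apply flatB_no_ad
      intro j hj1 hj2 hP
      rcases hP with ⟨hm, hne⟩
      have hlen' : (ws.length : Int) ≤ 200 := by exact_mod_cast h
      omega
    · rw [flatC, dif_neg h]
      have hsplit : ws = ws.take 200 ++ ws.drop 200 := (List.take_append_drop 200 ws).symm
      conv_lhs => rw [hsplit]
      rw [flatB_append]
      have hlen : ((ws.take 200).length : Int) = 200 := by simp; omega
      rw [hlen]
      have hlen2 : (200 : Int) < (ws.length : Int) := by exact_mod_cast (by omega : 200 < ws.length)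
      rw [flatB_chunk ad n (ws.take 200) s
          (by intro hcon; rw [hcon] at hlen; simp at hlen)
          (by intro j hj1 hj2 hP
              rcases hP with ⟨hm, _⟩
              rw [hlen] at hj2
              omega)
          (by rw [hlen]
              constructor
              · omega
              · rw [hn]; omega)]
      rw [ih (ws.drop 200) (s + 200) (by rw [List.length_drop]; omega) (by omega) (by omega)
          (by rw [hn, List.length_drop]; omega)]
      simp

lemma sjoin_singleton (sep p : String) : PySem.Str.join sep [p] = p := by
  simp [PySem.Str.join, PySem.Chars.join_singleton, String.ofList_toList]

lemma sjoin_cons_cons (sep p q : String) (rest : List String) :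
    PySem.Str.join sep (p :: q :: rest) = p ++ sep ++ PySem.Str.join sep (q :: rest) := by
  simp only [PySem.Str.join, List.map_cons, PySem.Chars.join_cons_cons,
    String.ofList_append, String.ofList_toList]

lemma sjoin_append (sep : String) :
    ∀ (xs ys : List String), xs ≠ [] → ys ≠ [] →
    PySem.Str.join sep (xs ++ ys) = PySem.Str.join sep xs ++ sep ++ PySem.Str.join sep ys := by
  intro xs
  induction xs with
  | nil => intro ys h _; exact absurd rfl h
  | cons x xs' ih =>
    intro ys _ hys
    cases xs' with
    | nil =>
      cases ys with
      | nil => exact absurd rfl hys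
      | cons y ys' => simp only [List.nil_append, List.cons_append, sjoin_cons_cons,
          sjoin_singleton]
    | cons x' xs'' =>
      conv_lhs => rw [show (x :: x' :: xs'') ++ ys = x :: x' :: (xs'' ++ ys) from by simp,
        sjoin_cons_cons, ← List.cons_append]
      rw [ih ys (by simp) hys]
      conv_rhs => rw [sjoin_cons_cons]
      simp [String.append_assoc]

lemma chunksA_ne_nil (ad : String) (ws : List String) : chunksA ad ws ≠ [] := by
  rw [chunksA]; split <;> simp

lemma flatC_ne_nil (ad : String) (ws : List String) (h : ws ≠ []) : flatC ad ws ≠ [] := by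
  rw [flatC]; split
  · exact h
  · simp

lemma join_chunks_flat (ad : String) :
    ∀ (fuel : Nat) (ws : List String), ws.length ≤ fuel → ws ≠ [] →
    PySem.Str.join " " (chunksA ad ws) = PySem.Str.join " " (flatC ad ws) := by
  intro fuel
  induction fuel with
  | zero =>
    intro ws h1 h2
    exact absurd (List.eq_nil_of_length_eq_zero (by omega)) h2
  | succ f ih =>
    intro ws h1 h2
    by_cases h : ws.length ≤ 200
    · rw [chunksA, dif_pos h, flatC, dif_pos h, sjoin_singleton]
    · have hdrop : (ws.drop 200) ≠ [] := by
        intro hcon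
        have := congrArg List.length hcon
        simp at this; omega
      rw [chunksA, dif_neg h, flatC, dif_neg h]
      obtain ⟨r, rest, hr⟩ : ∃ r rest, chunksA ad (ws.drop 200) = r :: rest := by
        cases hch : chunksA ad (ws.drop 200) with
        | nil => exact absurd hch (chunksA_ne_nil ad _)
        | cons r rest => exact ⟨r, rest, rfl⟩
      rw [sjoin_append " " (ws.take 200) (ad :: flatC ad (ws.drop 200))
          (by intro hcon
              have := congrArg List.length hcon
              rw [List.length_take] at this
              simp only [List.length_nil] at this
              omega) (by simp)]
      obtain ⟨q, qrest, hq⟩ : ∃ q qrest, flatC ad (ws.drop 200) = q :: qrest := by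
        cases hfl : flatC ad (ws.drop 200) with
        | nil => exact absurd hfl (flatC_ne_nil ad _ hdrop)
        | cons q qrest => exact ⟨q, qrest, rfl⟩
      have hlf : (ws.drop 200).length ≤ f := by
        rw [List.length_drop]; omega
      rw [sjoin_cons_cons, hr, sjoin_cons_cons, ← hr, hq, sjoin_cons_cons, ← hq,
        ih (ws.drop 200) hlf hdrop]

-- ===== VERDICT (by name: the statement is the Claim_ definition above) =====
theorem insert_advertisements_spec : Claim_equal_insert_advertisements := by
  unfold Claim_equal_insert_advertisements
  intro dt u _hdom
  unfold Spec_insert_advertisements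
  unfold insert_advertisements insert_advertisements_alt
  by_cases h0 : dt = "" ∨ u = ""
  · simp [h0]
  · simp only [if_neg h0]
    set words := PySem.Str.split₀ dt with hwords
    set ad := "<img src=\"" ++ u ++ "\" class=\"mx-auto\" alt=\"add\" />" with had
    by_cases h1 : words.length ≤ 200
    · simp [h1]
    · simp only [if_neg h1]
      have hlen : 200 < words.length := by omega
      have hA := foldA_gen ad words words.length 0 [] (by omega) (by omega)
      simp only [Nat.cast_zero, List.drop_zero, List.nil_append] at hA
      rw [hA]
      have hB := foldB_gen ad (words.length : Int) words 0 []
      simp only [List.nil_append] at hB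
      rw [hB]
      rw [flatB_eq_flatC ad (words.length : Int) words.length words 0 le_rfl le_rfl
        (by norm_num) (by simp)]
      exact join_chunks_flat ad words.length words le_rfl
        (by intro hcon; rw [hcon] at hlen; simp at hlen)
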